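-- pv_equiv track=rewrite | github.com/katebarouch/paintbyai | clean_paths.py | merge_neighboring_paths
-- ===== SOURCE A (Python) =====
-- def merge_neighboring_paths(paths, attributes):
--     merged_paths = []
--     merged_attributes = []
--
--     for index, path in enumerate(paths):
--         path_attributes = attributes[index]
--
--         if 'fill' in path_attributes and 'd' in path_attributes:
--             fill_color = path_attributes['fill']
--
--             # Check if the current path has the same fill color as the previous merged path
--             if merged_paths and merged_attributes[-1]['fill'] == fill_color:
--                 # Append the current path's 'd' attribute to the previous merged path's 'd' attribute
--                 merged_attributes[-1]['d'] += " " + path_attributes['d']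
--             else:
--                 # Add a new merged path with the current path's attributes
--                 merged_paths.append(path)
--                 merged_attributes.append(path_attributes)
--
--     return merged_paths, merged_attributes
-- ===== SOURCE B (Python) =====
-- def merge_neighboring_paths(paths, attributes):
--     # Run-scanning re-implementation: filter once, then consume maximal
--     # same-fill runs with a two-pointer scan.  (Like A, it updates the
--     # 'd' entry of each run's first attribute dict in place.)
--     kept = [(p, a) for p, a in zip(paths, attributes) if 'fill' in a and 'd' in a]
--     merged_paths = []
--     merged_attributes = []
--     i = 0
--     n = len(kept)
--     while i < n:
--         path, attr = kept[i]
--         fill = attr['fill']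
--         d = attr['d']
--         j = i + 1
--         while j < n and kept[j][1]['fill'] == fill:
--             d = d + " " + kept[j][1]['d']
--             j += 1
--         attr['d'] = d
--         merged_paths.append(path)
--         merged_attributes.append(attr)
--         i = j
--     return merged_paths, merged_attributes
-- ===== Notes on version B (the rewrite author's own statement) =====
-- stated objective: alternative
-- what changed: A appends to output lists and merges each element into the last output attribute dict; B filters the zipped pairs once and then consumes maximal same-fill runs with a two-pointer scan, accumulating each run's 'd' string before emitting one (path, attr) per run.
import Mathlib
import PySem

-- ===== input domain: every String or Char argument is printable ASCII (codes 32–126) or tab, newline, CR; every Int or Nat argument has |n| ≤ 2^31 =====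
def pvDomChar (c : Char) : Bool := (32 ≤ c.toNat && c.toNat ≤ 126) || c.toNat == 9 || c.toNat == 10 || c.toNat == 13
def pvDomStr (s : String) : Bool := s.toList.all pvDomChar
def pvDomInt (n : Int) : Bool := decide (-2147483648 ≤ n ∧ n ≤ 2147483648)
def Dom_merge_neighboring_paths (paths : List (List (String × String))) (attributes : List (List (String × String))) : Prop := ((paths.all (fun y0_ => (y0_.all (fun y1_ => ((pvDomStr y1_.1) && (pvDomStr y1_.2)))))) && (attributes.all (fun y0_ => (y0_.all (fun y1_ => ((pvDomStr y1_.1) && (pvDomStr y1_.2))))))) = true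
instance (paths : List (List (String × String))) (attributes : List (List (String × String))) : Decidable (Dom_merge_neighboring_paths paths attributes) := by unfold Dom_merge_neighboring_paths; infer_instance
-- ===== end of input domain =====

-- B replaces A's compare-with-last-output fold by a filter-then-run-scanning pass (alternative
-- decomposition, same cost). Both Pythons mutate the 'd' entry of each run's first attribute
-- dict in place; the equivalence proved here is about the return value.

-- ===== PORT A =====
-- A's attribute dicts enter as association lists; PySem.Dict.ofList is the dict the Python sees.
-- The 'if' branch that merges: merged_attributes[-1]['d'] += " " + path_attributes['d'].
-- The .getD defaults below are only reached outside Pre_ (IndexError) or on states the loop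
-- never produces (the last merged dict always has 'fill' and 'd').
def pvMergeStep (acc : List (List (String × String)) × List (PySem.Dict String String))
    (p : List (String × String)) (pa : PySem.Dict String String) :
    List (List (String × String)) × List (PySem.Dict String String) :=
  if acc.1 ≠ [] ∧ ((PySem.List.pyGet? acc.2 (-1)).getD PySem.Dict.empty).getD "fill" "" = pa.getD "fill" "" then
    (acc.1, acc.2.dropLast ++
      [((PySem.List.pyGet? acc.2 (-1)).getD PySem.Dict.empty).insert "d"
        (((PySem.List.pyGet? acc.2 (-1)).getD PySem.Dict.empty).getD "d" "" ++ " " ++ pa.getD "d" "")])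
  else
    (acc.1 ++ [p], acc.2 ++ [pa])

def pvStepA (acc : List (List (String × String)) × List (PySem.Dict String String))
    (p : List (String × String)) (pa : PySem.Dict String String) :
    List (List (String × String)) × List (PySem.Dict String String) :=
  if pa.contains "fill" && pa.contains "d" then pvMergeStep acc p pa else acc

def pvLoopA (attributes : List (List (String × String))) :
    List (List (String × String)) → Nat →
    (List (List (String × String)) × List (PySem.Dict String String)) →
    List (List (String × String)) × List (PySem.Dict String String)
  | [], _, acc => acc
  | p :: rest, i, acc =>
      pvLoopA attributes rest (i + 1)
        (pvStepA acc p (PySem.Dict.ofList ((PySem.List.pyGet? attributes (i : Int)).getD [])))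

def merge_neighboring_paths (paths : List (List (String × String))) (attributes : List (List (String × String))) : (List (List (String × String))) × (List (List (String × String))) :=
  let r := pvLoopA attributes paths 0 ([], [])
  (r.1, r.2.map PySem.Dict.items)

-- ===== PORT B =====
-- kept = [(p, a) for p, a in zip(paths, attributes) if 'fill' in a and 'd' in a]
def pvKept (paths attributes : List (List (String × String))) :
    List (List (String × String) × PySem.Dict String String) :=
  ((paths.zip attributes).map (fun pa => (pa.1, PySem.Dict.ofList pa.2))).filter
    (fun pa => pa.2.contains "fill" && pa.2.contains "d")

-- inner while: extend d over the run of same-fill neighbours, return (d, rest)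
def pvRun (fill : String) : String →
    List (List (String × String) × PySem.Dict String String) →
    String × List (List (String × String) × PySem.Dict String String)
  | d, [] => (d, [])
  | d, x :: rest =>
      if x.2.getD "fill" "" = fill then pvRun fill (d ++ " " ++ x.2.getD "d" "") rest
      else (d, x :: rest)

lemma pvRun_len_le (fill : String) : ∀ (d : String) (l : List (List (String × String) × PySem.Dict String String)),
    (pvRun fill d l).2.length ≤ l.length
  | _, [] => le_refl _
  | d, x :: rest => by
      rw [pvRun]
      split
      · exact le_trans (pvRun_len_le fill _ rest) (Nat.le_succ _)
      · exact le_refl _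

-- outer while: one iteration per run
def pvGo : List (List (String × String) × PySem.Dict String String) →
    List (List (String × String)) × List (PySem.Dict String String)
  | [] => ([], [])
  | x :: rest =>
      let r := pvRun (x.2.getD "fill" "") (x.2.getD "d" "") rest
      let s := pvGo r.2
      (x.1 :: s.1, x.2.insert "d" r.1 :: s.2)
  termination_by l => l.length
  decreasing_by simpa using Nat.lt_succ_of_le (pvRun_len_le _ _ _)

def merge_neighboring_paths_alt (paths : List (List (String × String))) (attributes : List (List (String × String))) : (List (List (String × String))) × (List (List (String × String))) :=
  let s := pvGo (pvKept paths attributes)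
  (s.1, s.2.map PySem.Dict.items)

-- ===== PRECONDITION & SPEC =====
-- A raises IndexError at attributes[index] when attributes is shorter than paths.
def Pre_merge_neighboring_paths (paths : List (List (String × String))) (attributes : List (List (String × String))) : Prop :=
  paths.length ≤ attributes.length
instance (paths : List (List (String × String))) (attributes : List (List (String × String))) : Decidable (Pre_merge_neighboring_paths paths attributes) := by unfold Pre_merge_neighboring_paths; infer_instance

def pvWitness_merge_neighboring_paths : (List (List (String × String))) × (List (List (String × String))) :=
  ([[("id", "p1")], [("id", "p2")]],
   [[("fill", "red"), ("d", "M0 0")], [("fill", "red"), ("d", "L1 1")]])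

def Spec_merge_neighboring_paths (paths : List (List (String × String))) (attributes : List (List (String × String))) (out : (List (List (String × String))) × (List (List (String × String)))) : Prop := out = merge_neighboring_paths_alt paths attributes
instance (paths : List (List (String × String))) (attributes : List (List (String × String))) (out : (List (List (String × String))) × (List (List (String × String)))) : Decidable (Spec_merge_neighboring_paths paths attributes out) := by unfold Spec_merge_neighboring_paths; infer_instance

-- ===== CLAIM (what is proved, stated in full; the proofs are below) =====
def Claim_equal_merge_neighboring_paths : Prop := ∀ (paths : List (List (String × String))) (attributes : List (List (String × String))), Dom_merge_neighboring_paths paths attributes → Pre_merge_neighboring_paths paths attributes → Spec_merge_neighboring_paths paths attributes (merge_neighboring_paths paths attributes)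

-- ===== LEMMAS AND PROOFS =====

-- inserting twice under the same key keeps only the last value
lemma pvInsertInsert {κ ν : Type} [BEq κ] [LawfulBEq κ] (d : PySem.Dict κ ν) (k : κ) (v w : ν) :
    (d.insert k v).insert k w = d.insert k w := by
  apply PySem.Dict.ext
  rw [PySem.Dict.items_insert_of_contains _ _ (PySem.Dict.contains_insert_self d k v)]
  by_cases hc : d.contains k = true
  · rw [PySem.Dict.items_insert_of_contains _ _ hc, PySem.Dict.items_insert_of_contains _ _ hc,
      List.map_map]
    refine List.map_congr_left (fun p _ => ?_)
    by_cases h : (p.1 == k) = true <;> simp [h]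
  · have hc' : d.contains k = false := by simpa using hc
    rw [PySem.Dict.items_insert_of_not_contains _ _ hc', PySem.Dict.items_insert_of_not_contains _ _ hc']
    have hall : ∀ p ∈ d.items, (p.1 == k) = false := by
      intro p hp
      by_contra h
      exact hc (List.any_of_mem hp (by simpa using h))
    rw [List.map_append]
    simp only [List.map_cons, List.map_nil, beq_self_eq_true]
    congr 1
    refine (List.map_congr_left (fun p hp => ?_)).trans (List.map_id _)
    simp [hall p hp]

-- re-inserting the present value is a no-op (keys unique)
lemma pvInsertSelf {κ ν : Type} [BEq κ] [LawfulBEq κ] (d : PySem.Dict κ ν) (k : κ) (v0 : ν)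
    (hn : d.keys.Nodup) (hc : d.contains k = true) : d.insert k (d.getD k v0) = d := by
  apply PySem.Dict.ext
  rw [PySem.Dict.items_insert_of_contains _ _ hc]
  refine (List.map_congr_left (fun p hp => ?_)).trans (List.map_id _)
  by_cases h : (p.1 == k) = true
  · have hk : p.1 = k := by simpa using h
    have hv : d.getD p.1 v0 = p.2 := PySem.Dict.getD_of_mem_items d (by simpa using hp) hn v0
    simp [← hk, hv]
  · simp [h]

-- A's indexed loop is the fold over the zip (inside Pre_)
lemma pvLoopA_eq (attributes : List (List (String × String))) :
    ∀ (ps : List (List (String × String))) (i : Nat)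
      (acc : List (List (String × String)) × List (PySem.Dict String String)),
      i + ps.length ≤ attributes.length →
      pvLoopA attributes ps i acc =
        (ps.zip (attributes.drop i)).foldl
          (fun acc x => pvStepA acc x.1 (PySem.Dict.ofList x.2)) acc
  | [], i, acc, _ => by simp [pvLoopA]
  | p :: rest, i, acc, h => by
      have hi : i < attributes.length := by simp at h; omega
      rw [pvLoopA, List.drop_eq_getElem_cons hi, List.zip_cons_cons, List.foldl_cons,
        pvLoopA_eq attributes rest (i + 1) _ (by simp at h ⊢; omega)]
      congr 2
      simp [hi]

-- the heart: A's fold with last-element merging, started just after it appended (p0, a0.insert "d" d0),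
-- computes B's run decomposition
lemma pvFoldMerge :
    ∀ (L : List (List (String × String) × PySem.Dict String String)),
      (∀ x ∈ L, x.2.contains "fill" = true ∧ x.2.contains "d" = true ∧ x.2.keys.Nodup) →
      ∀ (ps : List (List (String × String))) (as : List (PySem.Dict String String))
        (p0 : List (String × String)) (a0 : PySem.Dict String String) (d0 : String),
      L.foldl (fun acc x => pvMergeStep acc x.1 x.2) (ps ++ [p0], as ++ [a0.insert "d" d0]) =
        (ps ++ p0 :: (pvGo (pvRun (a0.getD "fill" "") d0 L).2).1,
         as ++ a0.insert "d" (pvRun (a0.getD "fill" "") d0 L).1 :: (pvGo (pvRun (a0.getD "fill" "") d0 L).2).2)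
  | [], _, ps, as, p0, a0, d0 => by simp [pvRun, pvGo]
  | x :: T, hQ, ps, as, p0, a0, d0 => by
      obtain ⟨hf, hd, hn⟩ := hQ x List.mem_cons_self
      have hQ' := fun y hy => hQ y (List.mem_cons_of_mem x hy)
      rw [List.foldl_cons]
      have hlast : PySem.List.pyGet? (as ++ [a0.insert "d" d0]) (-1) = some (a0.insert "d" d0) :=
        PySem.List.pyGet?_neg_one_append_singleton _ _
      have hfill : (a0.insert "d" d0).getD "fill" "" = a0.getD "fill" "" := by
        rw [PySem.Dict.getD_insert]; simp
      by_cases hc : x.2.getD "fill" "" = a0.getD "fill" ""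
      · have hstep : pvMergeStep (ps ++ [p0], as ++ [a0.insert "d" d0]) x.1 x.2 =
            (ps ++ [p0], as ++ [a0.insert "d" (d0 ++ " " ++ x.2.getD "d" "")]) := by
          simp only [pvMergeStep, hlast, Option.getD_some, hfill]
          rw [if_pos ⟨by simp, hc.symm⟩]
          simp [PySem.Dict.getD_insert_self, pvInsertInsert]
        rw [hstep, pvFoldMerge T hQ' ps as p0 a0 _,
          show pvRun (a0.getD "fill" "") d0 (x :: T) =
            pvRun (a0.getD "fill" "") (d0 ++ " " ++ x.2.getD "d" "") T from by rw [pvRun, if_pos hc]]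
      · have hstep : pvMergeStep (ps ++ [p0], as ++ [a0.insert "d" d0]) x.1 x.2 =
            ((ps ++ [p0]) ++ [x.1], (as ++ [a0.insert "d" d0]) ++ [x.2]) := by
          simp only [pvMergeStep, hlast, Option.getD_some, hfill]
          rw [if_neg (fun h => hc h.2.symm)]
        rw [hstep]
        conv_lhs => rw [show x.2 = x.2.insert "d" (x.2.getD "d" "") from (pvInsertSelf x.2 "d" "" hn hd).symm]
        rw [pvFoldMerge T hQ' (ps ++ [p0]) (as ++ [a0.insert "d" d0]) x.1 x.2 _,
          show pvRun (a0.getD "fill" "") d0 (x :: T) = (d0, x :: T) from by rw [pvRun, if_neg hc]]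
        simp only [pvGo]
        simp

-- every element of pvKept has 'fill', 'd' and unique keys
lemma pvKept_elems (paths attributes : List (List (String × String))) :
    ∀ x ∈ pvKept paths attributes,
      x.2.contains "fill" = true ∧ x.2.contains "d" = true ∧ x.2.keys.Nodup := by
  intro x hx
  rw [pvKept, List.mem_filter] at hx
  obtain ⟨hmem, hq⟩ := hx
  obtain ⟨pa, _, hpa⟩ := List.mem_map.mp hmem
  refine ⟨(Bool.and_eq_true .. ▸ hq).1, (Bool.and_eq_true .. ▸ hq).2, ?_⟩
  rw [← hpa]
  exact PySem.Dict.nodup_keys_ofList pa.2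

-- ===== VERDICT (by name: the statement is the Claim_ definition above) =====
theorem merge_neighboring_paths_spec : Claim_equal_merge_neighboring_paths := by
  intro paths attributes _ hPre
  unfold Spec_merge_neighboring_paths merge_neighboring_paths merge_neighboring_paths_alt
  rw [pvLoopA_eq attributes paths 0 ([], []) (by simpa [Pre_merge_neighboring_paths] using hPre)]
  simp only [List.drop_zero]
  have h1 : (paths.zip attributes).foldl
        (fun acc x => pvStepA acc x.1 (PySem.Dict.ofList x.2)) ([], []) =
      (pvKept paths attributes).foldl (fun acc x => pvMergeStep acc x.1 x.2) ([], []) := by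
    rw [pvKept, ← PySem.List.foldl_if_eq_foldl_filter
      (p := fun pa : List (String × String) × PySem.Dict String String =>
        pa.2.contains "fill" && pa.2.contains "d")
      (f := fun (acc : List (List (String × String)) × List (PySem.Dict String String))
        (x : List (String × String) × PySem.Dict String String) => pvMergeStep acc x.1 x.2),
      List.foldl_map]
    simp only [pvStepA]
  rw [h1]
  cases hk : pvKept paths attributes with
  | nil => simp [pvGo]
  | cons x T =>
      have hx := pvKept_elems paths attributes x (hk ▸ List.mem_cons_self)
      have hT := fun y hy => pvKept_elems paths attributes y (hk ▸ List.mem_cons_of_mem x hy)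
      rw [List.foldl_cons]
      have hstep0 : pvMergeStep ([], []) x.1 x.2 =
          (([] : List (List (String × String))) ++ [x.1],
           ([] : List (PySem.Dict String String)) ++ [x.2.insert "d" (x.2.getD "d" "")]) := by
        rw [pvMergeStep, if_neg (by simp)]
        simp [pvInsertSelf x.2 "d" "" hx.2.2 hx.2.1]
      rw [hstep0, pvFoldMerge T hT [] [] x.1 x.2 _]
      simp only [pvGo]
      simp
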